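-- pv_equiv track=rewrite | github.com/kartikeyaagr/Invariant-Synthesis-using-z3-Dafny | Week11/z3_quadratic_solver.py | _simulate_loop
-- ===== SOURCE A (Python) =====
-- from typing import List, Dict, Optional, Tuple, Any, Set
--
-- def _simulate_loop(var_names: List[str], init_values: Dict[str, int],
--                    update_exprs: Dict[str, str], loop_bound: int) -> List[Dict[str, int]]:
--     """Simulate loop execution to get reachable states"""
--     states = []
--     values = dict(init_values)
--
--     # Add initial state
--     states.append(dict(values))
--
--     for _ in range(loop_bound):
--         new_values = {}
--         for var in var_names:
--             update = update_exprs.get(var, "+0")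
--             old_val = values.get(var, 0)
--
--             if update.startswith('+'):
--                 delta = int(update[1:])
--                 new_values[var] = old_val + delta
--             elif update.startswith('-'):
--                 delta = int(update[1:])
--                 new_values[var] = old_val - delta
--             elif update.startswith('*'):
--                 factor = int(update[1:])
--                 new_values[var] = old_val * factor
--             elif update.startswith('sq'):
--                 # Square the value (for testing quadratic growth)
--                 new_values[var] = old_val * old_val
--             else:
--                 new_values[var] = old_val
--
--         values = new_values
--         states.append(dict(values))
--
--     return states
-- ===== SOURCE B (Python) =====
-- def _simulate_loop(var_names, init_values, update_exprs, loop_bound):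
--     """Closed-form simulation: each variable's trajectory is computed
--     independently from its (parsed-once) update rule, then states are
--     assembled per step."""
--     states = [dict(init_values)]
--     if loop_bound <= 0:
--         return states
--     # Parse each variable's update rule once.
--     rules = {}
--     for var in var_names:
--         u = update_exprs.get(var, "+0")
--         if u.startswith('+'):
--             rules[var] = ('lin', int(u[1:]))
--         elif u.startswith('-'):
--             rules[var] = ('lin', -int(u[1:]))
--         elif u.startswith('*'):
--             rules[var] = ('geo', int(u[1:]))
--         elif u.startswith('sq'):
--             rules[var] = ('sq', 0)
--         else:
--             rules[var] = ('const', 0)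
--     base = {var: init_values.get(var, 0) for var in var_names}
--     for k in range(1, loop_bound + 1):
--         states.append({var: _value_at(rules[var], base[var], k)
--                        for var in var_names})
--     return states
--
--
-- def _value_at(rule, x0, k):
--     kind, a = rule
--     if kind == 'lin':
--         return x0 + a * k
--     if kind == 'geo':
--         return x0 * a ** k
--     if kind == 'sq':
--         return x0 ** (2 ** k)
--     return x0
-- ===== Notes on version B (the rewrite author's own statement) =====
-- stated objective: alternative
-- what changed: A simulates step by step, re-parsing every update string and rebuilding the state dict from the previous one on each iteration; B parses each variable's rule once and evaluates a per-variable closed-form trajectory (x0+a*k, x0*a**k, x0**2**k, or constant) independently at every step k, assembling the per-step dicts from those closed forms.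
import Mathlib
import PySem

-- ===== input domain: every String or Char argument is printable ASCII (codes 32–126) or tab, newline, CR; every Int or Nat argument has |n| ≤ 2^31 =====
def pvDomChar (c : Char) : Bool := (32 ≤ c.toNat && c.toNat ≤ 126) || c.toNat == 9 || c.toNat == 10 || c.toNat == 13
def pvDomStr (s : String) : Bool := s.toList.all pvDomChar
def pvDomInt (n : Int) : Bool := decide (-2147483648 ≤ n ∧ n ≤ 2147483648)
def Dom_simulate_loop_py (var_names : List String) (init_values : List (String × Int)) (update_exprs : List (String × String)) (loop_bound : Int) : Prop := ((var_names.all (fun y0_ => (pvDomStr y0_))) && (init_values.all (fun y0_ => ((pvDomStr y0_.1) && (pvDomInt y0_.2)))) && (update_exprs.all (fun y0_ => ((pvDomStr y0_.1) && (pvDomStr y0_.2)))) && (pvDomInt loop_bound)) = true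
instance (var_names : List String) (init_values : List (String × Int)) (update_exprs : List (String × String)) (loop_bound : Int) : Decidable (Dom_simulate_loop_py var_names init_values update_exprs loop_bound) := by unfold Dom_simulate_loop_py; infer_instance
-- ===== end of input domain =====

-- B replaces A's step-by-step state rebuilding by parsing each update rule once and
-- evaluating a per-variable closed-form trajectory at every step (objective: alternative).

-- ===== PORT A =====
-- Literal port of A. Where Python's int(update[1:]) would raise ValueError the port uses
-- (… ).getD 0; exactly those inputs are excluded by Pre_simulate_loop_py below.
def simulate_loop_py (var_names : List String) (init_values : List (String × Int)) (update_exprs : List (String × String)) (loop_bound : Int) : List (List (String × Int)) :=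
  let values := PySem.Dict.mk init_values          -- values = dict(init_values)
  let states : List (List (String × Int)) := [values.items]   -- states.append(dict(values))
  (List.foldl (fun (st : List (List (String × Int)) × PySem.Dict String Int) _ =>
      let new_values := var_names.foldl (fun (nv : PySem.Dict String Int) var =>
        let update := (PySem.Dict.mk update_exprs).getD var "+0"
        let old_val := st.2.getD var 0
        if PySem.Str.startswith update "+" then
          nv.insert var (old_val + (PySem.Int.ofStr? (PySem.Str.slice update (some 1) none)).getD 0)
        else if PySem.Str.startswith update "-" then
          nv.insert var (old_val - (PySem.Int.ofStr? (PySem.Str.slice update (some 1) none)).getD 0)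
        else if PySem.Str.startswith update "*" then
          nv.insert var (old_val * (PySem.Int.ofStr? (PySem.Str.slice update (some 1) none)).getD 0)
        else if PySem.Str.startswith update "sq" then
          nv.insert var (old_val * old_val)
        else
          nv.insert var old_val) PySem.Dict.empty
      (st.1 ++ [new_values.items], new_values))
    (states, values) (PySem.List.pyRange 0 loop_bound 1)).1

-- ===== PORT B =====
-- _value_at(rule, x0, k) of Source B; Python's ** here has a nonnegative exponent, which is
-- exactly Lean's ^ on Nat exponents (k comes from range(1, loop_bound+1), so 0 ≤ k).
def pvValueAt (rule : String × Int) (x0 : Int) (k : Int) : Int :=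
  if rule.1 == "lin" then x0 + rule.2 * k
  else if rule.1 == "geo" then x0 * rule.2 ^ k.toNat
  else if rule.1 == "sq" then x0 ^ ((2 : Nat) ^ k.toNat)
  else x0

def simulate_loop_py_alt (var_names : List String) (init_values : List (String × Int)) (update_exprs : List (String × String)) (loop_bound : Int) : List (List (String × Int)) :=
  let states : List (List (String × Int)) := [(PySem.Dict.mk init_values).items]
  if loop_bound ≤ 0 then states
  else
    let rules := var_names.foldl (fun (r : PySem.Dict String (String × Int)) var =>
        let u := (PySem.Dict.mk update_exprs).getD var "+0"
        if PySem.Str.startswith u "+" then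
          r.insert var ("lin", (PySem.Int.ofStr? (PySem.Str.slice u (some 1) none)).getD 0)
        else if PySem.Str.startswith u "-" then
          r.insert var ("lin", -(PySem.Int.ofStr? (PySem.Str.slice u (some 1) none)).getD 0)
        else if PySem.Str.startswith u "*" then
          r.insert var ("geo", (PySem.Int.ofStr? (PySem.Str.slice u (some 1) none)).getD 0)
        else if PySem.Str.startswith u "sq" then
          r.insert var ("sq", 0)
        else
          r.insert var ("const", 0)) PySem.Dict.empty
    let base := var_names.foldl (fun (b : PySem.Dict String Int) var =>
        b.insert var ((PySem.Dict.mk init_values).getD var 0)) PySem.Dict.empty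
    states ++ (PySem.List.pyRange 1 (loop_bound + 1) 1).map (fun k =>
      (var_names.foldl (fun (d : PySem.Dict String Int) var =>
        d.insert var (pvValueAt (rules.getD var ("const", 0)) (base.getD var 0) k)) PySem.Dict.empty).items)

-- ===== PRECONDITION & SPEC =====
-- Does the update string chosen for `var` parse wherever A would call int() on it?
def pvParseOK (update_exprs : List (String × String)) (var : String) : Bool :=
  let u := (PySem.Dict.mk update_exprs).getD var "+0"
  if PySem.Str.startswith u "+" then (PySem.Int.ofStr? (PySem.Str.slice u (some 1) none)).isSome
  else if PySem.Str.startswith u "-" then (PySem.Int.ofStr? (PySem.Str.slice u (some 1) none)).isSome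
  else if PySem.Str.startswith u "*" then (PySem.Int.ofStr? (PySem.Str.slice u (some 1) none)).isSome
  else true

-- Pre_ excludes exactly the inputs on which Python A raises ValueError: the loop runs
-- (loop_bound ≥ 1) and some variable's update starts with '+', '-' or '*' but its tail
-- is not int()-parseable.
def Pre_simulate_loop_py (var_names : List String) (init_values : List (String × Int)) (update_exprs : List (String × String)) (loop_bound : Int) : Prop :=
  1 ≤ loop_bound → ∀ var ∈ var_names, pvParseOK update_exprs var = true
instance (var_names : List String) (init_values : List (String × Int)) (update_exprs : List (String × String)) (loop_bound : Int) : Decidable (Pre_simulate_loop_py var_names init_values update_exprs loop_bound) := by unfold Pre_simulate_loop_py; infer_instance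

def pvWitness_simulate_loop_py : List String × (List (String × Int)) × (List (String × String)) × Int :=
  (["x", "y"], [("x", 3)], [("x", "+2"), ("y", "*2")], 2)

def Spec_simulate_loop_py (var_names : List String) (init_values : List (String × Int)) (update_exprs : List (String × String)) (loop_bound : Int) (out : List (List (String × Int))) : Prop := out = simulate_loop_py_alt var_names init_values update_exprs loop_bound
instance (var_names : List String) (init_values : List (String × Int)) (update_exprs : List (String × String)) (loop_bound : Int) (out : List (List (String × Int))) : Decidable (Spec_simulate_loop_py var_names init_values update_exprs loop_bound out) := by unfold Spec_simulate_loop_py; infer_instance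

-- ===== CLAIM (what is proved, stated in full; the proofs are below) =====
def Claim_equal_simulate_loop_py : Prop := ∀ (var_names : List String) (init_values : List (String × Int)) (update_exprs : List (String × String)) (loop_bound : Int), Dom_simulate_loop_py var_names init_values update_exprs loop_bound → Pre_simulate_loop_py var_names init_values update_exprs loop_bound → Spec_simulate_loop_py var_names init_values update_exprs loop_bound (simulate_loop_py var_names init_values update_exprs loop_bound)

-- ===== LEMMAS AND PROOFS =====
def pvParse (u : String) : Int := (PySem.Int.ofStr? (PySem.Str.slice u (some 1) none)).getD 0

-- value of A's if-chain for one variable, as a function of the update string and old value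
def pvStepVal (u : String) (old : Int) : Int :=
  if PySem.Str.startswith u "+" then old + pvParse u
  else if PySem.Str.startswith u "-" then old - pvParse u
  else if PySem.Str.startswith u "*" then old * pvParse u
  else if PySem.Str.startswith u "sq" then old * old
  else old

-- closed-form trajectory of one variable after k steps
def pvTraj (ue : List (String × String)) (iv : List (String × Int)) (var : String) (k : Nat) : Int :=
  if PySem.Str.startswith ((PySem.Dict.mk ue).getD var "+0") "+" then
    (PySem.Dict.mk iv).getD var 0 + pvParse ((PySem.Dict.mk ue).getD var "+0") * k
  else if PySem.Str.startswith ((PySem.Dict.mk ue).getD var "+0") "-" then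
    (PySem.Dict.mk iv).getD var 0 - pvParse ((PySem.Dict.mk ue).getD var "+0") * k
  else if PySem.Str.startswith ((PySem.Dict.mk ue).getD var "+0") "*" then
    (PySem.Dict.mk iv).getD var 0 * (pvParse ((PySem.Dict.mk ue).getD var "+0")) ^ k
  else if PySem.Str.startswith ((PySem.Dict.mk ue).getD var "+0") "sq" then
    (PySem.Dict.mk iv).getD var 0 ^ ((2 : Nat) ^ k)
  else (PySem.Dict.mk iv).getD var 0

def pvAsm (ue : List (String × String)) (iv : List (String × Int)) (vn : List String) (k : Nat) : PySem.Dict String Int :=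
  vn.foldl (fun d v => d.insert v (pvTraj ue iv v k)) PySem.Dict.empty

theorem pv_getD_foldl_insert_fn {ν : Type} (vn : List String) (f : String → ν) (d : PySem.Dict String ν) (x : String) (dflt : ν) :
    (vn.foldl (fun d v => d.insert v (f v)) d).getD x dflt = if x ∈ vn then f x else d.getD x dflt := by
  induction vn generalizing d with
  | nil => simp
  | cons v t ih =>
    simp only [List.foldl_cons, ih, PySem.Dict.getD_insert, List.mem_cons]
    by_cases hx : x ∈ t <;> by_cases hv : x = v <;> simp [hx, hv]

theorem pvTraj_zero (ue : List (String × String)) (iv : List (String × Int)) (v : String) :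
    pvTraj ue iv v 0 = (PySem.Dict.mk iv).getD v 0 := by
  unfold pvTraj; split_ifs <;> simp

theorem pvStep_pvTraj (ue : List (String × String)) (iv : List (String × Int)) (v : String) (k : Nat) :
    pvStepVal ((PySem.Dict.mk ue).getD v "+0") (pvTraj ue iv v k) = pvTraj ue iv v (k + 1) := by
  unfold pvStepVal pvTraj
  split_ifs
  · push_cast; ring
  · push_cast; ring
  · rw [pow_succ]; ring
  · rw [← pow_add]
    have : (2 : Nat) ^ k + 2 ^ k = 2 ^ (k + 1) := by rw [pow_succ]; omega
    rw [this]
  · rfl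

theorem pvAsm_getD (ue : List (String × String)) (iv : List (String × Int)) (vn : List String) (k : Nat) (v : String) (hv : v ∈ vn) :
    (pvAsm ue iv vn k).getD v 0 = pvTraj ue iv v k := by
  unfold pvAsm; rw [pv_getD_foldl_insert_fn]; simp [hv]

theorem pvStepDict_eq (ue : List (String × String)) (iv : List (String × Int)) (vn : List String)
    (values : PySem.Dict String Int) (k : Nat)
    (h : ∀ v ∈ vn, values.getD v 0 = pvTraj ue iv v k) :
    (vn.foldl (fun (nv : PySem.Dict String Int) var =>
        let update := (PySem.Dict.mk ue).getD var "+0"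
        let old_val := values.getD var 0
        if PySem.Str.startswith update "+" then
          nv.insert var (old_val + (PySem.Int.ofStr? (PySem.Str.slice update (some 1) none)).getD 0)
        else if PySem.Str.startswith update "-" then
          nv.insert var (old_val - (PySem.Int.ofStr? (PySem.Str.slice update (some 1) none)).getD 0)
        else if PySem.Str.startswith update "*" then
          nv.insert var (old_val * (PySem.Int.ofStr? (PySem.Str.slice update (some 1) none)).getD 0)
        else if PySem.Str.startswith update "sq" then
          nv.insert var (old_val * old_val)
        else
          nv.insert var old_val) PySem.Dict.empty) = pvAsm ue iv vn (k + 1) := by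
  unfold pvAsm
  apply PySem.List.foldl_congr_mem' (h := ?_)
  intro v hv nv
  have h2 := pvStep_pvTraj ue iv v k
  unfold pvStepVal at h2
  simp only [pvParse] at h2
  simp only [h v hv]
  split_ifs at h2 ⊢ <;> rw [h2]

theorem pvAloop (ue : List (String × String)) (iv : List (String × Int)) (vn : List String) (l : List Int) :
    ∀ (k : Nat) (values : PySem.Dict String Int) (states : List (List (String × Int))),
    (∀ v ∈ vn, values.getD v 0 = pvTraj ue iv v k) →
    (List.foldl (fun (st : List (List (String × Int)) × PySem.Dict String Int) _ =>
      let new_values := vn.foldl (fun (nv : PySem.Dict String Int) var =>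
        let update := (PySem.Dict.mk ue).getD var "+0"
        let old_val := st.2.getD var 0
        if PySem.Str.startswith update "+" then
          nv.insert var (old_val + (PySem.Int.ofStr? (PySem.Str.slice update (some 1) none)).getD 0)
        else if PySem.Str.startswith update "-" then
          nv.insert var (old_val - (PySem.Int.ofStr? (PySem.Str.slice update (some 1) none)).getD 0)
        else if PySem.Str.startswith update "*" then
          nv.insert var (old_val * (PySem.Int.ofStr? (PySem.Str.slice update (some 1) none)).getD 0)
        else if PySem.Str.startswith update "sq" then
          nv.insert var (old_val * old_val)
        else
          nv.insert var old_val) PySem.Dict.empty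
      (st.1 ++ [new_values.items], new_values))
      (states, values) l).1 = states ++ (List.range l.length).map (fun i => (pvAsm ue iv vn (k + 1 + i)).items) := by
  induction l with
  | nil => intro k values states h; simp
  | cons x t ih =>
    intro k values states h
    rw [List.foldl_cons]
    have hs := pvStepDict_eq ue iv vn values k h
    simp only [hs]
    rw [ih (k + 1) (pvAsm ue iv vn (k + 1)) _ (fun v hv => pvAsm_getD ue iv vn (k + 1) v hv)]
    have harith : ∀ i : Nat, k + 1 + 1 + i = k + 1 + (i + 1) := by omega
    simp [List.range_succ_eq_map, List.map_map, Function.comp, harith]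
-- the rule Source B's parsing loop stores for one variable
def pvRuleF (ue : List (String × String)) (var : String) : String × Int :=
  if PySem.Str.startswith ((PySem.Dict.mk ue).getD var "+0") "+" then ("lin", pvParse ((PySem.Dict.mk ue).getD var "+0"))
  else if PySem.Str.startswith ((PySem.Dict.mk ue).getD var "+0") "-" then ("lin", -pvParse ((PySem.Dict.mk ue).getD var "+0"))
  else if PySem.Str.startswith ((PySem.Dict.mk ue).getD var "+0") "*" then ("geo", pvParse ((PySem.Dict.mk ue).getD var "+0"))
  else if PySem.Str.startswith ((PySem.Dict.mk ue).getD var "+0") "sq" then ("sq", 0)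
  else ("const", 0)

theorem pvValueAt_eq_pvTraj (ue : List (String × String)) (iv : List (String × Int)) (v : String) (kk : Int) (hkk : 0 ≤ kk) :
    pvValueAt (pvRuleF ue v) ((PySem.Dict.mk iv).getD v 0) kk = pvTraj ue iv v kk.toNat := by
  unfold pvValueAt pvRuleF pvTraj
  have hcast : ((kk.toNat : Nat) : Int) = kk := Int.toNat_of_nonneg hkk
  split_ifs <;> simp_all <;> try ring
theorem pvA_eq (vn : List String) (iv : List (String × Int)) (ue : List (String × String)) (lb : Int) :
    simulate_loop_py vn iv ue lb = [iv] ++ (List.range lb.toNat).map (fun i => (pvAsm ue iv vn (0 + 1 + i)).items) := by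
  simp only [simulate_loop_py]
  rw [pvAloop ue iv vn (PySem.List.pyRange 0 lb 1) 0 (PySem.Dict.mk iv) [iv]
      (fun v _ => (pvTraj_zero ue iv v).symm)]
  simp [PySem.List.length_pyRange_one]
theorem pvB_eq (vn : List String) (iv : List (String × Int)) (ue : List (String × String)) (lb : Int) :
    simulate_loop_py_alt vn iv ue lb = if lb ≤ 0 then [iv] else [iv] ++ (List.range lb.toNat).map (fun j => (pvAsm ue iv vn (1 + j)).items) := by
  simp only [simulate_loop_py_alt]
  split_ifs with hlb
  · rfl
  · congr 1
    rw [PySem.List.pyRange_one]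
    have : (lb + 1 - 1).toNat = lb.toNat := by omega
    rw [this, List.map_map]
    apply List.map_congr_left
    intro j _
    simp only [Function.comp]
    have hk : (0 : Int) ≤ 1 + (j : Int) := by omega
    have htn : (1 + (j : Int)).toNat = 1 + j := by omega
    -- the per-step dict comprehension equals pvAsm
    have hrules : ∀ v ∈ vn, (vn.foldl (fun (r : PySem.Dict String (String × Int)) var =>
        if PySem.Str.startswith ((PySem.Dict.mk ue).getD var "+0") "+" then
          r.insert var ("lin", (PySem.Int.ofStr? (PySem.Str.slice ((PySem.Dict.mk ue).getD var "+0") (some 1) none)).getD 0)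
        else if PySem.Str.startswith ((PySem.Dict.mk ue).getD var "+0") "-" then
          r.insert var ("lin", -(PySem.Int.ofStr? (PySem.Str.slice ((PySem.Dict.mk ue).getD var "+0") (some 1) none)).getD 0)
        else if PySem.Str.startswith ((PySem.Dict.mk ue).getD var "+0") "*" then
          r.insert var ("geo", (PySem.Int.ofStr? (PySem.Str.slice ((PySem.Dict.mk ue).getD var "+0") (some 1) none)).getD 0)
        else if PySem.Str.startswith ((PySem.Dict.mk ue).getD var "+0") "sq" then
          r.insert var ("sq", 0)
        else r.insert var ("const", 0)) PySem.Dict.empty).getD v ("const", 0) = pvRuleF ue v := by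
      intro v hv
      have hb : (vn.foldl (fun (r : PySem.Dict String (String × Int)) var =>
          if PySem.Str.startswith ((PySem.Dict.mk ue).getD var "+0") "+" then
            r.insert var ("lin", (PySem.Int.ofStr? (PySem.Str.slice ((PySem.Dict.mk ue).getD var "+0") (some 1) none)).getD 0)
          else if PySem.Str.startswith ((PySem.Dict.mk ue).getD var "+0") "-" then
            r.insert var ("lin", -(PySem.Int.ofStr? (PySem.Str.slice ((PySem.Dict.mk ue).getD var "+0") (some 1) none)).getD 0)
          else if PySem.Str.startswith ((PySem.Dict.mk ue).getD var "+0") "*" then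
            r.insert var ("geo", (PySem.Int.ofStr? (PySem.Str.slice ((PySem.Dict.mk ue).getD var "+0") (some 1) none)).getD 0)
          else if PySem.Str.startswith ((PySem.Dict.mk ue).getD var "+0") "sq" then
            r.insert var ("sq", 0)
          else r.insert var ("const", 0)) PySem.Dict.empty)
          = vn.foldl (fun (r : PySem.Dict String (String × Int)) var => r.insert var (pvRuleF ue var)) PySem.Dict.empty := by
        apply PySem.List.foldl_congr_mem' (h := ?_)
        intro x _ r
        unfold pvRuleF pvParse
        split_ifs <;> rfl
      rw [hb, pv_getD_foldl_insert_fn]; simp [hv]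
    have hbase : ∀ v ∈ vn, (vn.foldl (fun (b : PySem.Dict String Int) var =>
        b.insert var ((PySem.Dict.mk iv).getD var 0)) PySem.Dict.empty).getD v 0 = (PySem.Dict.mk iv).getD v 0 := by
      intro v hv
      rw [pv_getD_foldl_insert_fn]; simp [hv]
    unfold pvAsm
    congr 1
    apply PySem.List.foldl_congr_mem' (h := ?_)
    intro v hv d
    rw [hrules v hv, hbase v hv, pvValueAt_eq_pvTraj ue iv v _ hk, htn]
theorem pv_final (vn : List String) (iv : List (String × Int)) (ue : List (String × String)) (lb : Int) :
    simulate_loop_py vn iv ue lb = simulate_loop_py_alt vn iv ue lb := by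
  rw [pvA_eq, pvB_eq]
  split_ifs with hlb
  · have : lb.toNat = 0 := by omega
    simp [this]
  · simp

-- ===== VERDICT (by name: the statement is the Claim_ definition above) =====
theorem simulate_loop_py_spec : Claim_equal_simulate_loop_py := by
  intro var_names init_values update_exprs loop_bound _ _
  unfold Spec_simulate_loop_py
  exact pv_final var_names init_values update_exprs loop_bound
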